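-- pv_equiv track=rewrite | github.com/Sainaamr/figure | figure.py | pixels
-- ===== SOURCE A (Python) =====
-- def pixels(lst2):
--     lst3 = []
--     lst4 = []
--     for number in lst2:
--         lst4.append(number)
--         if number + 1 not in lst2:
--             lst3.append(tuple(lst4))
--             lst4.clear()
--     return lst3
-- ===== SOURCE B (Python) =====
-- def pixels(lst2):
--     s = set(lst2)
--     bounds = [i for i, n in enumerate(lst2) if n + 1 not in s]
--     out = []
--     prev = 0
--     for b in bounds:
--         out.append(tuple(lst2[prev:b + 1]))
--         prev = b + 1
--     return out
-- ===== Notes on version B (the rewrite author's own statement) =====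
-- stated objective: faster
-- what changed: Replaces A's single buffer-accumulating pass with per-element O(n) list membership by a set built once plus a boundary-index table, then a second pass over the boundaries that slices the segments out of the input.
import Mathlib
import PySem

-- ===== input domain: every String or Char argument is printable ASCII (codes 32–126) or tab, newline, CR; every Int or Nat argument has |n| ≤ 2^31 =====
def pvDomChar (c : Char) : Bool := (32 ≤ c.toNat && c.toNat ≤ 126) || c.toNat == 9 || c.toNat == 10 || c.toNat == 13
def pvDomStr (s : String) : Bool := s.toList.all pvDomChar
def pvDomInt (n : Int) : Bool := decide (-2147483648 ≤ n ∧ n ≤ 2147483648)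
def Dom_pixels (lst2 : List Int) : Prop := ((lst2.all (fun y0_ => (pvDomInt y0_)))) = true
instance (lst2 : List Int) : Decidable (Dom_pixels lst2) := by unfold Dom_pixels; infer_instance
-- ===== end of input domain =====

-- B replaces A's quadratic buffer pass (per-element list membership) by a set built once
-- plus a boundary-index table and a second pass slicing segments out of the input (faster).


-- ===== PORT A =====
-- for number in lst2: lst4.append; if number+1 not in lst2: flush lst4 into lst3
def pixels (lst2 : List Int) : List (List Int) :=
  (lst2.foldl
    (fun (st : List (List Int) × List Int) number =>
      let lst4 := st.2 ++ [number]
      if (number + 1) ∈ lst2 then (st.1, lst4)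
      else (st.1 ++ [lst4], []))
    ([], [])).1

-- ===== PORT B =====
-- s = set(lst2); bounds = [i for i,n in enumerate(lst2) if n+1 not in s];
-- then for b in bounds: out.append(lst2[prev:b+1]); prev = b+1
def pixels_alt (lst2 : List Int) : List (List Int) :=
  let s := PySem.Set.ofList lst2
  let bounds : List Int :=
    ((PySem.List.enumerate lst2).filter
      (fun p => !(PySem.Set.contains s (p.2 + 1)))).map (fun p => p.1)
  (bounds.foldl
    (fun (st : List (List Int) × Int) b =>
      (st.1 ++ [PySem.List.slice lst2 (some st.2) (some (b + 1))], b + 1))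
    ([], 0)).1

-- ===== PRECONDITION & SPEC =====
def Spec_pixels (lst2 : List Int) (out : List (List Int)) : Prop := out = pixels_alt lst2
instance (lst2 : List Int) (out : List (List Int)) : Decidable (Spec_pixels lst2 out) := by unfold Spec_pixels; infer_instance

-- ===== CLAIM (what is proved, stated in full; the proofs are below) =====
def Claim_equal_pixels : Prop := ∀ (lst2 : List Int), Dom_pixels lst2 → Spec_pixels lst2 (pixels lst2)

-- ===== LEMMAS AND PROOFS =====

-- common grouping recursion: pending segment, flush at a boundary, drop the trailing partial
def pvGroups (lst2 pending : List Int) : List Int → List (List Int)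
  | [] => []
  | n :: xs =>
      if (n + 1) ∈ lst2 then pvGroups lst2 (pending ++ [n]) xs
      else (pending ++ [n]) :: pvGroups lst2 [] xs

-- boundary indices of the suffix xs, offset by off
def pvBnds (lst2 : List Int) (off : Int) : List Int → List Int
  | [] => []
  | n :: xs =>
      if (n + 1) ∈ lst2 then pvBnds lst2 (off + 1) xs
      else off :: pvBnds lst2 (off + 1) xs

lemma pixels_foldl_eq (lst2 : List Int) :
    ∀ (xs l4 : List Int) (l3 : List (List Int)),
      (xs.foldl
        (fun (st : List (List Int) × List Int) number =>
          let lst4 := st.2 ++ [number]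
          if (number + 1) ∈ lst2 then (st.1, lst4)
          else (st.1 ++ [lst4], []))
        (l3, l4)).1 = l3 ++ pvGroups lst2 l4 xs := by
  intro xs
  induction xs with
  | nil => intro l4 l3; simp [pvGroups]
  | cons n xs ih =>
      intro l4 l3
      by_cases h : (n + 1) ∈ lst2 <;>
        simp [pvGroups, h, List.foldl_cons, ih, List.append_assoc]

lemma bounds_eq (xs : List Int) (lst2 : List Int) :
    ∀ (s : Int),
      ((PySem.List.enumerate xs s).filter
        (fun p => !(PySem.Set.contains (PySem.Set.ofList lst2) (p.2 + 1)))).map (fun p => p.1)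
        = pvBnds lst2 s xs := by
  induction xs with
  | nil => intro s; simp [PySem.List.enumerate_nil, pvBnds]
  | cons n xs ih =>
      intro s
      rw [PySem.List.enumerate_cons]
      by_cases h : (n + 1) ∈ lst2 <;>
        simp [pvBnds, h, PySem.Set.mem_ofList] <;>
        simpa using ih (s + 1)

lemma slice_snoc (lst2 : List Int) (prev off : Nat) (hpo : prev ≤ off)
    (hlt : off < lst2.length) :
    PySem.List.slice lst2 (some (prev : Int)) (some ((off : Int) + 1))
      = PySem.List.slice lst2 (some (prev : Int)) (some (off : Int)) ++ [lst2[off]] := by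
  have h1 : ((off : Int) + 1) = ((off + 1 : Nat) : Int) := by push_cast; ring
  rw [h1, PySem.List.slice_natCast, PySem.List.slice_natCast]
  have h2 : off + 1 - prev = (off - prev) + 1 := by omega
  rw [h2, List.take_add_one]
  have h3 : (lst2.drop prev)[off - prev]? = some lst2[off] := by
    rw [List.getElem?_drop]
    have : prev + (off - prev) = off := by omega
    rw [this, List.getElem?_eq_getElem hlt]
  simp [h3]

lemma foldB_eq (lst2 : List Int) :
    ∀ (xs : List Int) (off prev : Nat) (acc : List (List Int)),
      prev ≤ off → lst2.drop off = xs →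
      ((pvBnds lst2 (off : Int) xs).foldl
        (fun (st : List (List Int) × Int) b =>
          (st.1 ++ [PySem.List.slice lst2 (some st.2) (some (b + 1))], b + 1))
        (acc, (prev : Int))).1
        = acc ++ pvGroups lst2 (PySem.List.slice lst2 (some (prev : Int)) (some (off : Int))) xs := by
  intro xs
  induction xs with
  | nil => intro off prev acc _ _; simp [pvBnds, pvGroups]
  | cons n xs ih =>
      intro off prev acc hpo hdrop
      have hlt : off < lst2.length := by
        by_contra hge
        rw [List.drop_eq_nil_of_le (by omega)] at hdrop
        simp at hdrop
      have hn : lst2[off] = n := by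
        have h : lst2[off + 0]? = some n := by rw [← List.getElem?_drop, hdrop]; rfl
        rw [List.getElem?_eq_getElem (by omega : off + 0 < lst2.length)] at h
        simpa using h
      have hdrop' : lst2.drop (off + 1) = xs := by
        have : lst2.drop (off + 1) = (lst2.drop off).drop 1 := by
          rw [List.drop_drop]
        simpa [hdrop] using this
      have hsnoc := slice_snoc lst2 prev off hpo hlt
      rw [hn] at hsnoc
      by_cases h : (n + 1) ∈ lst2
      · have hcast : (off : Int) + 1 = ((off + 1 : Nat) : Int) := by push_cast; ring
        rw [pvBnds, if_pos h, hcast, ih (off + 1) prev acc (by omega) hdrop']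
        rw [← hcast, hsnoc]
        simp [pvGroups, h]
      · have hcast : (off : Int) + 1 = ((off + 1 : Nat) : Int) := by push_cast; ring
        rw [pvBnds, if_neg h, List.foldl_cons]
        simp only
        rw [hcast, ih (off + 1) (off + 1) _ (le_refl _) hdrop']
        have hempty : PySem.List.slice lst2 (some ((off + 1 : Nat) : Int)) (some ((off + 1 : Nat) : Int)) = ([] : List Int) := by
          rw [PySem.List.slice_natCast]; simp
        rw [hempty, ← hcast, hsnoc]
        simp [pvGroups, h, List.append_assoc]

-- ===== VERDICT (by name: the statement is the Claim_ definition above) =====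
theorem pixels_spec : Claim_equal_pixels := by
  intro lst2 _
  show pixels lst2 = pixels_alt lst2
  unfold pixels pixels_alt
  rw [pixels_foldl_eq lst2 lst2 [] []]
  simp only [bounds_eq lst2 lst2]
  rw [show ((0 : Int)) = ((0 : Nat) : Int) by norm_num]
  rw [foldB_eq lst2 lst2 0 0 [] (le_refl _) (by simp), PySem.List.slice_natCast]
  simp
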